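-- pv_equiv track=rewrite | github.com/Umme-Tasmiah/kmap_simplifier | logic/kmap.py | get_literals_from_minterms
-- ===== SOURCE A (Python) =====
-- variables = ('A', 'B', 'C', 'D')
--
-- def get_literals_from_minterms(minterm_set):
--     if not minterm_set:
--         return ""
--     bits = [format(m, '04b') for m in minterm_set]
--     expression = ''
--     for i in range(4):
--         column = {b[i] for b in bits}
--         if len(column) == 1:
--             bit = column.pop()
--             expression += variables[i] + ('' if bit == '1' else "'")
--     return expression
-- ===== SOURCE B (Python) =====
-- variables = ('A', 'B', 'C', 'D')
--
-- def get_literals_from_minterms(minterm_set):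
--     # Single pass: remember the first formatted minterm and track, per column,
--     # whether every later one agrees with it there.
--     ref = None
--     same = [True, True, True, True]
--     for m in minterm_set:
--         b = format(m, '04b')
--         if ref is None:
--             ref = b
--         else:
--             same = [s and b[i] == ref[i] for i, s in enumerate(same)]
--     if ref is None:
--         return ""
--     return ''.join(variables[i] + ('' if ref[i] == '1' else "'")
--                    for i in range(4) if same[i])
-- ===== Notes on version B (the rewrite author's own statement) =====
-- stated objective: simpler
-- what changed: B replaces A's per-column sets built from the list of formatted strings by a single pass that remembers the first formatted minterm and keeps four booleans recording whether every later minterm agrees with it in each column.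
import Mathlib
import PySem

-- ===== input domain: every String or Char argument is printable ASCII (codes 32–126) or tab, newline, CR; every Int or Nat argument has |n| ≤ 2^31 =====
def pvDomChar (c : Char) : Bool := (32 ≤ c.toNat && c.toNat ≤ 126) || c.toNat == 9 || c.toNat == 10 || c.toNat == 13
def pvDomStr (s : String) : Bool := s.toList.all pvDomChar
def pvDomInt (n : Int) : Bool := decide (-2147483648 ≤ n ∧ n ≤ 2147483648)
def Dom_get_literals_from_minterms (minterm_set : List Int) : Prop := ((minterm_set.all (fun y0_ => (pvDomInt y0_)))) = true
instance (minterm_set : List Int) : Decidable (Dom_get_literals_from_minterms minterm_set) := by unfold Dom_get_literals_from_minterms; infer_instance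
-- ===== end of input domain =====

-- B replaces A's per-column character sets by a single pass that compares every
-- formatted minterm against the first one's four columns (objective: simpler —
-- no sets, one boolean vector); equal to A on every input.

-- ===== PORT A =====
def pvVariables : List String := ["A", "B", "C", "D"]

-- format(m, '04b'): binary digits zero-padded to width 4, the '-' sign kept in
-- front for negatives (padding goes after the sign) — exact for every Int.
def pvFmt04b (m : Int) : String :=
  let cs := PySem.Int.toBinChars m
  String.ofList (if cs.headD ' ' == '-'
    then '-' :: (List.replicate (3 - (cs.length - 1)) '0' ++ cs.tail)
    else List.replicate (4 - cs.length) '0' ++ cs)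

def get_literals_from_minterms (minterm_set : List Int) : String :=
  if minterm_set.isEmpty then ""
  else
    let bits := minterm_set.map (fun m => pvFmt04b m)
    (PySem.List.pyRange 0 4 1).foldl (fun expression i =>
      let column : PySem.Set Char :=
        PySem.Set.ofList (bits.map (fun b => (PySem.Str.pyGet? b i).getD ' '))
      if PySem.Set.len column == 1 then
        -- set.pop() on a one-element set returns its unique element
        let bit := column.headD ' '
        expression ++ ((PySem.List.pyGet? pvVariables i).getD "")
          ++ (if bit == '1' then "" else "'")
      else expression) ""

-- ===== PORT B =====
def get_literals_from_minterms_alt (minterm_set : List Int) : String :=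
  -- ref = None; same = [True]*4; for m: b = format(m,'04b'); first sets ref,
  -- later ones and-in per-column agreement with ref
  let st := minterm_set.foldl
    (fun (st : Option String × List Bool) m =>
      match st.1 with
      | none => (some (pvFmt04b m), st.2)
      | some ref =>
        (some ref, (PySem.List.enumerate st.2).map (fun p =>
          p.2 && ((PySem.Str.pyGet? (pvFmt04b m) p.1).getD ' '
                   == (PySem.Str.pyGet? ref p.1).getD ' '))))
    (none, [true, true, true, true])
  match st.1 with
  | none => ""
  | some ref =>
    -- ''.join(variables[i] + ('' if ref[i]=='1' else "'") for i in range(4) if same[i])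
    (PySem.List.pyRange 0 4 1).foldl (fun expression i =>
      if (PySem.List.pyGet? st.2 i).getD false then
        expression ++ ((PySem.List.pyGet? pvVariables i).getD "")
          ++ (if ((PySem.Str.pyGet? ref i).getD ' ' == '1') then "" else "'")
      else expression) ""

-- ===== PRECONDITION & SPEC =====
def Spec_get_literals_from_minterms (minterm_set : List Int) (out : String) : Prop :=
  out = get_literals_from_minterms_alt minterm_set
instance (minterm_set : List Int) (out : String) :
    Decidable (Spec_get_literals_from_minterms minterm_set out) := by
  unfold Spec_get_literals_from_minterms; infer_instance

-- ===== CLAIM (what is proved, stated in full; the proofs are below) =====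
def Claim_equal_get_literals_from_minterms : Prop :=
  ∀ (minterm_set : List Int), Dom_get_literals_from_minterms minterm_set →
    Spec_get_literals_from_minterms minterm_set (get_literals_from_minterms minterm_set)

-- ===== LEMMAS AND PROOFS =====

theorem pv_add_mem {α : Type} [BEq α] [LawfulBEq α] (c : α) :
    PySem.Set.add [c] c = [c] := by
  simp [PySem.Set.add, PySem.Set.contains]

theorem pv_fold_add {α : Type} [BEq α] [LawfulBEq α] (c : α) :
    ∀ (l : List α), (∀ x ∈ l, x = c) → l.foldl PySem.Set.add [c] = [c]
  | [], _ => rfl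
  | x :: xs, h => by
    have hx := h x (by simp)
    subst hx
    simp only [List.foldl_cons, pv_add_mem]
    exact pv_fold_add x xs (fun y hy => h y (by simp [hy]))

theorem pv_set_head {α : Type} [BEq α] [LawfulBEq α] (c : α) (l : List α)
    (h : ∀ x ∈ l, x = c) : PySem.Set.ofList (c :: l) = [c] := by
  have base : PySem.Set.ofList (c :: l) = l.foldl PySem.Set.add [c] := by
    rw [PySem.Set.ofList_eq_foldl]; rfl
  rw [base]; exact pv_fold_add c l h

theorem pv_set_single {α : Type} [BEq α] [LawfulBEq α] (c : α) (l : List α) :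
    (PySem.Set.ofList (c :: l)).length = 1 ↔ ∀ x ∈ l, x = c := by
  constructor
  · intro h1 x hx
    obtain ⟨a, ha⟩ := List.length_eq_one_iff.mp h1
    have hc : c ∈ PySem.Set.ofList (c :: l) := (PySem.Set.mem_ofList _ _).mpr (by simp)
    have hxm : x ∈ PySem.Set.ofList (c :: l) := (PySem.Set.mem_ofList _ _).mpr (by simp [hx])
    rw [ha] at hc hxm
    simp at hc hxm
    exact hxm.trans hc.symm
  · intro h; rw [pv_set_head c l h]; rfl

theorem pv_beq_int (a b : Int) : (a == b) = decide (a = b) := by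
  by_cases h : a = b <;> simp [h]

-- A's per-column condition 'len(set(column)) == 1' as a boolean over the tail
theorem pv_col_cond (c : Char) (l : List Char) :
    (PySem.Set.len (PySem.Set.ofList (c :: l)) == 1) = l.all (fun x => x == c) := by
  rw [PySem.Set.len, pv_beq_int]
  rw [show (decide (((PySem.Set.ofList (c :: l)).length : Int) = 1))
      = decide ((PySem.Set.ofList (c :: l)).length = 1) from
    decide_eq_decide.mpr (by exact_mod_cast Iff.rfl)]
  rw [show decide ((PySem.Set.ofList (c :: l)).length = 1)
      = decide (∀ x ∈ l, x = c) from decide_eq_decide.mpr (pv_set_single c l)]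
  cases hb : l.all (fun x => x == c) with
  | false =>
    rw [List.all_eq_false] at hb
    obtain ⟨x, hx, hne⟩ := hb
    simp only [decide_eq_false_iff_not]
    intro hP
    exact hne (by simpa using hP x hx)
  | true =>
    rw [List.all_eq_true] at hb
    simp only [decide_eq_true_eq]
    exact fun x hx => by simpa using hb x hx

-- B's one-pass fold of the boolean vector, in closed form
theorem pv_sameFold (ref : String) :
    ∀ (rest : List Int) (b0 b1 b2 b3 : Bool),
    rest.foldl
      (fun (same : List Bool) m =>
        (PySem.List.enumerate same).map (fun p =>
          p.2 && ((PySem.Str.pyGet? (pvFmt04b m) p.1).getD ' '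
                   == (PySem.Str.pyGet? ref p.1).getD ' ')))
      [b0, b1, b2, b3]
    = [b0 && rest.all (fun m => (PySem.Str.pyGet? (pvFmt04b m) 0).getD ' ' == (PySem.Str.pyGet? ref 0).getD ' '),
       b1 && rest.all (fun m => (PySem.Str.pyGet? (pvFmt04b m) 1).getD ' ' == (PySem.Str.pyGet? ref 1).getD ' '),
       b2 && rest.all (fun m => (PySem.Str.pyGet? (pvFmt04b m) 2).getD ' ' == (PySem.Str.pyGet? ref 2).getD ' '),
       b3 && rest.all (fun m => (PySem.Str.pyGet? (pvFmt04b m) 3).getD ' ' == (PySem.Str.pyGet? ref 3).getD ' ')]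
  | [], b0, b1, b2, b3 => by simp
  | x :: rest, b0, b1, b2, b3 => by
    have hstep : (PySem.List.enumerate [b0, b1, b2, b3]).map (fun p =>
          p.2 && ((PySem.Str.pyGet? (pvFmt04b x) p.1).getD ' '
                   == (PySem.Str.pyGet? ref p.1).getD ' '))
        = [b0 && ((PySem.Str.pyGet? (pvFmt04b x) 0).getD ' ' == (PySem.Str.pyGet? ref 0).getD ' '),
           b1 && ((PySem.Str.pyGet? (pvFmt04b x) 1).getD ' ' == (PySem.Str.pyGet? ref 1).getD ' '),
           b2 && ((PySem.Str.pyGet? (pvFmt04b x) 2).getD ' ' == (PySem.Str.pyGet? ref 2).getD ' '),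
           b3 && ((PySem.Str.pyGet? (pvFmt04b x) 3).getD ' ' == (PySem.Str.pyGet? ref 3).getD ' ')] := by
      simp [PySem.List.enumerate_cons, PySem.List.enumerate_nil]
    simp only [List.foldl_cons, hstep, pv_sameFold ref rest, List.all_cons, Bool.and_assoc]

-- once ref is set, the fold only updates the boolean vector
theorem pv_foldRef (ref : String) :
    ∀ (rest : List Int) (same : List Bool),
    rest.foldl
      (fun (st : Option String × List Bool) m =>
        match st.1 with
        | none => (some (pvFmt04b m), st.2)
        | some r =>
          (some r, (PySem.List.enumerate st.2).map (fun p =>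
            p.2 && ((PySem.Str.pyGet? (pvFmt04b m) p.1).getD ' '
                     == (PySem.Str.pyGet? r p.1).getD ' '))))
      (some ref, same)
    = (some ref, rest.foldl
        (fun (same : List Bool) m =>
          (PySem.List.enumerate same).map (fun p =>
            p.2 && ((PySem.Str.pyGet? (pvFmt04b m) p.1).getD ' '
                     == (PySem.Str.pyGet? ref p.1).getD ' ')))
        same)
  | [], _ => rfl
  | x :: rest, same => by
    simp only [List.foldl_cons]
    exact pv_foldRef ref rest _

-- one column step of the final loops, generic in the position i
theorem pv_last_step (m0 : Int) (rest : List Int) (i : Int) (e v : String) :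
    (if PySem.Set.len (PySem.Set.ofList
          (((PySem.Str.pyGet? (pvFmt04b m0) i).getD ' ')
            :: rest.map (fun m => (PySem.Str.pyGet? (pvFmt04b m) i).getD ' '))) == 1 then
        e ++ v ++ (if (PySem.Set.ofList
          (((PySem.Str.pyGet? (pvFmt04b m0) i).getD ' ')
            :: rest.map (fun m => (PySem.Str.pyGet? (pvFmt04b m) i).getD ' '))).headD ' ' == '1'
          then "" else "'")
      else e)
    = (if true && rest.all (fun m =>
          (PySem.Str.pyGet? (pvFmt04b m) i).getD ' ' == (PySem.Str.pyGet? (pvFmt04b m0) i).getD ' ') then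
        e ++ v ++ (if (PySem.Str.pyGet? (pvFmt04b m0) i).getD ' ' == '1' then "" else "'")
      else e) := by
  rw [pv_col_cond]
  simp only [List.all_map, Function.comp_def, Bool.true_and]
  cases h : rest.all (fun m =>
      (PySem.Str.pyGet? (pvFmt04b m) i).getD ' ' == (PySem.Str.pyGet? (pvFmt04b m0) i).getD ' ') with
  | false => rfl
  | true =>
    have hhead : PySem.Set.ofList
          (((PySem.Str.pyGet? (pvFmt04b m0) i).getD ' ')
            :: rest.map (fun m => (PySem.Str.pyGet? (pvFmt04b m) i).getD ' '))
        = [(PySem.Str.pyGet? (pvFmt04b m0) i).getD ' '] := by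
      apply pv_set_head
      intro c hc
      rcases List.mem_map.mp hc with ⟨m, hm, rfl⟩
      simpa using List.all_eq_true.mp h m hm
    rw [hhead]
    simp only [List.headD_cons, if_true]
    rfl

-- ===== VERDICT (by name: the statement is the Claim_ definition above) =====
theorem get_literals_from_minterms_spec : Claim_equal_get_literals_from_minterms := by
  intro xs _
  unfold Spec_get_literals_from_minterms get_literals_from_minterms get_literals_from_minterms_alt
  cases xs with
  | nil => rfl
  | cons m0 rest =>
    simp only [List.isEmpty_cons, Bool.false_eq_true, if_false]
    have hfold : List.foldl
        (fun (st : Option String × List Bool) m =>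
          match st.1 with
          | none => (some (pvFmt04b m), st.2)
          | some ref =>
            (some ref, (PySem.List.enumerate st.2).map (fun p =>
              p.2 && ((PySem.Str.pyGet? (pvFmt04b m) p.1).getD ' '
                       == (PySem.Str.pyGet? ref p.1).getD ' '))))
        (none, [true, true, true, true]) (m0 :: rest)
      = (some (pvFmt04b m0),
         [true && rest.all (fun m => (PySem.Str.pyGet? (pvFmt04b m) 0).getD ' ' == (PySem.Str.pyGet? (pvFmt04b m0) 0).getD ' '),
          true && rest.all (fun m => (PySem.Str.pyGet? (pvFmt04b m) 1).getD ' ' == (PySem.Str.pyGet? (pvFmt04b m0) 1).getD ' '),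
          true && rest.all (fun m => (PySem.Str.pyGet? (pvFmt04b m) 2).getD ' ' == (PySem.Str.pyGet? (pvFmt04b m0) 2).getD ' '),
          true && rest.all (fun m => (PySem.Str.pyGet? (pvFmt04b m) 3).getD ' ' == (PySem.Str.pyGet? (pvFmt04b m0) 3).getD ' ')]) := by
      rw [List.foldl_cons]
      exact (pv_foldRef (pvFmt04b m0) rest [true, true, true, true]).trans
        (by rw [pv_sameFold (pvFmt04b m0) rest true true true true])
    rw [hfold]
    dsimp only
    apply PySem.List.foldl_congr_mem
    intro e i hi
    rw [show PySem.List.pyRange 0 4 1 = [0,1,2,3] from rfl] at hi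
    simp only [List.mem_cons, List.not_mem_nil, or_false] at hi
    have hcol : ∀ (j : Int), List.map (fun b => (PySem.Str.pyGet? b j).getD ' ')
        (List.map (fun m => pvFmt04b m) (m0 :: rest))
        = ((PySem.Str.pyGet? (pvFmt04b m0) j).getD ' ')
          :: rest.map (fun m => (PySem.Str.pyGet? (pvFmt04b m) j).getD ' ') := by
      intro j; simp [List.map_map, Function.comp]
    have hg0 : ∀ (a b c d : Bool), (PySem.List.pyGet? [a,b,c,d] (0:Int)).getD false = a :=
      fun _ _ _ _ => rfl
    have hg1 : ∀ (a b c d : Bool), (PySem.List.pyGet? [a,b,c,d] (1:Int)).getD false = b :=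
      fun _ _ _ _ => rfl
    have hg2 : ∀ (a b c d : Bool), (PySem.List.pyGet? [a,b,c,d] (2:Int)).getD false = c :=
      fun _ _ _ _ => rfl
    have hg3 : ∀ (a b c d : Bool), (PySem.List.pyGet? [a,b,c,d] (3:Int)).getD false = d :=
      fun _ _ _ _ => rfl
    rcases hi with rfl | rfl | rfl | rfl
    · rw [hcol 0, hg0]; exact pv_last_step m0 rest 0 e _
    · rw [hcol 1, hg1]; exact pv_last_step m0 rest 1 e _
    · rw [hcol 2, hg2]; exact pv_last_step m0 rest 2 e _
    · rw [hcol 3, hg3]; exact pv_last_step m0 rest 3 e _
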